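-- pv_equiv track=rewrite | github.com/pzhang345/AdventOfCode | 2025/03.py | part1
-- ===== SOURCE A (Python) =====
-- def part1(input: str):
--     lines = input.split("\n")
--     sum = 0
--     for line in lines:
--         max = [0, 0]
--         for i, char in enumerate(line):
--             v = int(char)
--
--             if v > max[0] and i < len(line) - 1:
--                 max[0] = v
--                 max[1] = 0
--             elif v > max[1]:
--                 max[1] = v
--
--         sum += max[0] * 10 + max[1]
--     return sum
-- ===== SOURCE B (Python) =====
-- def part1(input: str):
--     total = 0
--     for line in input.split("\n"):
--         best = 0
--         smax = None
--         for char in reversed(line):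
--             d = int(char)
--             if smax is None:
--                 best = d
--                 smax = d
--             else:
--                 if 10 * d + smax > best:
--                     best = 10 * d + smax
--                 if d > smax:
--                     smax = d
--         total += best
--     return total
-- ===== Notes on version B (the rewrite author's own statement) =====
-- stated objective: alternative
-- what changed: Replaces A's left-to-right greedy with a two-slot [first,second] state and an index guard for the last position by a single right-to-left pass per line that maintains the best two-digit answer and the running suffix maximum (seeded with the last digit, which also reproduces the one-char-line case).
import Mathlib
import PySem

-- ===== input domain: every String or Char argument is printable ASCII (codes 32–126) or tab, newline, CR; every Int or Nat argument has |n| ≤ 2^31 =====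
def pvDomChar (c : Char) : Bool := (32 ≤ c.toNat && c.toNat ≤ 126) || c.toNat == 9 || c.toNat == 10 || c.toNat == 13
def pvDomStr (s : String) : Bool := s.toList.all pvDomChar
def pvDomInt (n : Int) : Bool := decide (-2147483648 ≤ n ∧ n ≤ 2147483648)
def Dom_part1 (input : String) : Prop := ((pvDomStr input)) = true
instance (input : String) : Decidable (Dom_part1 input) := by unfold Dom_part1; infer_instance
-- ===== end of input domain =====

-- B replaces A's left-to-right two-slot greedy with a single right-to-left pass keeping the
-- best answer and the suffix maximum (alternative decomposition, same cost).

-- int(char) for a single character; `none` (ValueError) is excluded by Pre_part1, so getD 0 is never hit inside Pre_.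
def dval (c : Char) : Int := (PySem.Int.ofChars? [c]).getD 0

-- ===== PORT A =====
def part1 (input : String) : Int :=
  -- lines = input.split("\n")
  let lines := PySem.Chars.splitOn input.toList ['\n']
  lines.foldl (fun sum line =>
    -- max = [0, 0]; for i, char in enumerate(line): …
    let mx := (PySem.List.enumerate line 0).foldl
      (fun (mx : Int × Int) ic =>
        let v := dval ic.2
        if v > mx.1 ∧ ic.1 < (line.length : Int) - 1 then (v, 0)
        else if v > mx.2 then (mx.1, v)
        else mx) (0, 0)
    sum + (mx.1 * 10 + mx.2)) 0

-- ===== PORT B =====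
def part1_alt (input : String) : Int :=
  let lines := PySem.Chars.splitOn input.toList ['\n']
  lines.foldl (fun total line =>
    -- best = 0; smax = None; for char in reversed(line): …
    let st := line.reverse.foldl
      (fun (st : Int × Option Int) ch =>
        let d := dval ch
        match st.2 with
        | none => (d, some d)
        | some m =>
          (if 10 * d + m > st.1 then 10 * d + m else st.1,
           some (if d > m then d else m))) (0, none)
    total + st.1) 0

-- ===== PRECONDITION & SPEC =====
-- Pre_: every character of the input is a decimal digit or a newline — exactly where A's int(char) does not raise ValueError.
def Pre_part1 (input : String) : Prop :=
  (input.toList.all (fun c => PySem.Chars.isdigit c || c == '\n')) = true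
instance (input : String) : Decidable (Pre_part1 input) := by unfold Pre_part1; infer_instance
def pvWitness_part1 : String := "987\n4\n\n15"
def Spec_part1 (input : String) (out : Int) : Prop := out = part1_alt input
instance (input : String) (out : Int) : Decidable (Spec_part1 input out) := by unfold Spec_part1; infer_instance

-- ===== CLAIM (what is proved, stated in full; the proofs are below) =====
def Claim_equal_part1 : Prop := ∀ (input : String), Dom_part1 input → Pre_part1 input → Spec_part1 input (part1 input)

-- ===== LEMMAS AND PROOFS =====

-- value of a digit character
theorem dval_digit (c : Char) (h : PySem.Chars.isdigit c = true) :
    0 ≤ dval c ∧ dval c ≤ 9 := by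
  have : PySem.Int.ofChars? [c] = some ((c.toNat : Int) - 48) := by
    simp [PySem.Chars.isdigit] at h
    obtain ⟨h1, h2⟩ := h
    have hc : c = Char.ofNat c.toNat := (Char.ofNat_toNat c).symm
    have hb1 : 48 ≤ c.toNat := h1
    have hb2 : c.toNat ≤ 57 := h2
    set n := c.toNat with hn
    rw [hc]
    interval_cases n <;> decide
  simp [PySem.Chars.isdigit] at h
  have hb1 : 48 ≤ c.toNat := h.1
  have hb2 : c.toNat ≤ 57 := h.2
  simp [dval, this]
  omega

-- max of a list of Ints, seeded with 0 (proof-side abbreviation)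
def maxL (l : List Int) : Int := l.foldl max 0

theorem foldl_max_exchange (l : List Int) (a b : Int) :
    l.foldl max (max a b) = max a (l.foldl max b) := by
  induction l generalizing b with
  | nil => rfl
  | cons x t ih => simp only [List.foldl_cons, max_assoc, ih]

theorem maxL_cons (d : Int) (t : List Int) : maxL (d :: t) = max d (maxL t) := by
  simp only [maxL, List.foldl_cons]
  rw [max_comm (0 : Int) d, foldl_max_exchange]

theorem maxL_nonneg (l : List Int) : 0 ≤ maxL l := (PySem.List.le_foldl_max l 0).1

theorem maxL_le (l : List Int) (h : ∀ d ∈ l, d ≤ 9) : maxL l ≤ 9 := by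
  induction l with
  | nil => simp [maxL]
  | cons x t ih =>
    rw [maxL_cons]
    have := h x (by simp)
    have := ih (fun d hd => h d (by simp [hd]))
    omega

-- A's greedy loop, as structural recursion on the digit list (the last element is treated specially)
def g (a b : Int) : List Int → Int × Int
  | [] => (a, b)
  | [d] => (a, if d > b then d else b)
  | d :: e :: t =>
    if d > a then g d 0 (e :: t)
    else if d > b then g a d (e :: t)
    else g a b (e :: t)

-- best "pair" 10*d_i + d_j (i < j, d_i not last) whose first digit exceeds the threshold a,
-- first digits picked greedily left to right (0 if none)
def P (a : Int) : List Int → Int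
  | [] => 0
  | [_] => 0
  | d :: e :: t =>
    if d > a then max (10 * d + maxL (e :: t)) (P d (e :: t))
    else P a (e :: t)

-- B's per-line answer, as structural recursion
def Mb : List Int → Int
  | [] => 0
  | [d] => d
  | d :: e :: t => max (10 * d + maxL (e :: t)) (Mb (e :: t))

-- A's enumerate-fold equals g (the index guard i < n-1 says "not the last element")
theorem enumFold (n : Int) (l : List Char) (k : Int) (a b : Int)
    (hk : k + l.length = n) :
    (PySem.List.enumerate l k).foldl
      (fun (mx : Int × Int) ic =>
        let v := dval ic.2
        if v > mx.1 ∧ ic.1 < n - 1 then (v, 0)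
        else if v > mx.2 then (mx.1, v)
        else mx) (a, b)
    = g a b (l.map dval) := by
  induction l generalizing k a b with
  | nil => simp [PySem.List.enumerate_nil, g]
  | cons c t ih =>
    rw [PySem.List.enumerate_cons, List.foldl_cons]
    cases t with
    | nil =>
      have hk' : ¬ (k < n - 1) := by simp at hk; omega
      simp only [List.map_cons, List.map_nil, g, PySem.List.enumerate_nil, List.foldl_nil]
      by_cases hv : dval c > b
      · simp [hk', hv]
      · simp [hk', hv]
    | cons e t' =>
      have hk' : k < n - 1 := by simp at hk; omega
      have hrec := fun a' b' => ih (k := k + 1) a' b' (by simp at hk ⊢; omega)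
      by_cases h1 : dval c > a
      · simp only [h1, hk', and_self, if_pos]
        rw [hrec]
        simp [g, h1]
      · by_cases h2 : dval c > b
        · simp only [h1, false_and, if_pos h2]
          rw [hrec]
          simp [g, h1, h2]
        · simp only [h1, false_and, if_neg h2]
          rw [hrec]
          simp [g, h1, h2]

-- B's reversed fold computes (Mb, suffix max)
theorem bfold_spec (l : List Int) (hpos : ∀ d ∈ l, 0 ≤ d) :
    l.reverse.foldl
      (fun (st : Int × Option Int) d =>
        match st.2 with
        | none => (d, some d)
        | some m =>
          (if 10 * d + m > st.1 then 10 * d + m else st.1,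
           some (if d > m then d else m))) (0, none)
    = (Mb l, if l = [] then none else some (maxL l)) := by
  induction l with
  | nil => simp [Mb]
  | cons d t ih =>
    rw [List.reverse_cons, List.foldl_append,
      ih (fun x hx => hpos x (by simp [hx])), List.foldl_cons, List.foldl_nil]
    cases t with
    | nil =>
      have hd := hpos d (by simp)
      simp only [Mb, maxL_cons]
      simp [maxL]
      omega
    | cons e t' =>
      have hmaxl : 0 ≤ maxL (e :: t') := maxL_nonneg _
      have hmc := maxL_cons d (e :: t')
      rw [if_neg (List.cons_ne_nil e t'), if_neg (List.cons_ne_nil d (e :: t'))]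
      dsimp only
      rw [Prod.ext_iff]
      constructor
      · simp only [Mb]
        split_ifs <;> omega
      · simp only [Option.some_inj]
        split_ifs <;> omega

-- P is antitone in the threshold
theorem P_anti (l : List Int) (a c : Int) (hac : a ≤ c) : P c l ≤ P a l := by
  induction l generalizing a c with
  | nil => simp [P]
  | cons d t ih =>
    cases t with
    | nil => simp [P]
    | cons e t' =>
      by_cases h1 : d > c
      · have h2 : d > a := by omega
        simp [P, h1, h2]
      · by_cases h2 : d > a
        · simp only [P, if_neg h1, if_pos h2]
          have := ih d c (by omega)
          omega
        · simp only [P, if_neg h1, if_neg h2]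
          exact ih a c hac
-- P against a larger threshold plus its top pair bounds P
theorem P_bridge (l : List Int) (a c : Int) (ha : 0 ≤ a) (hac : a ≤ c)
    (hd : ∀ d ∈ l, 0 ≤ d ∧ d ≤ 9) :
    P a l ≤ max (10 * c + maxL l) (P c l) := by
  induction l generalizing a c with
  | nil => simp [P, maxL]
  | cons d t ih =>
    cases t with
    | nil => simp [P]
    | cons e t' =>
      have hdt : ∀ x ∈ (e :: t'), 0 ≤ x ∧ x ≤ 9 := fun x hx => hd x (by simp [hx])
      have hdd := hd d (by simp)
      have hml : 0 ≤ maxL (e :: t') := maxL_nonneg _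
      have hmc := maxL_cons d (e :: t')
      by_cases h1 : d > c
      · have h2 : d > a := by omega
        simp only [P, if_pos h1, if_pos h2]
        omega
      · by_cases h2 : d > a
        · simp only [P, if_neg h1, if_pos h2]
          have := ih d c (by omega) (by omega) hdt
          omega
        · simp only [P, if_neg h1, if_neg h2]
          have := ih a c ha hac hdt
          omega

-- the characterization of A's greedy loop
theorem g_spec (l : List Int) (a b : Int) (ha : 0 ≤ a) (hb0 : 0 ≤ b) (hb9 : b ≤ 9)
    (hd : ∀ d ∈ l, 0 ≤ d ∧ d ≤ 9) :
    10 * (g a b l).1 + (g a b l).2 = max (10 * a + max b (maxL l)) (P a l) := by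
  induction l generalizing a b with
  | nil => simp [g, P, maxL]; omega
  | cons d t ih =>
    cases t with
    | nil =>
      have hdd := hd d (by simp)
      simp only [g, P, maxL_cons]
      simp [maxL]
      by_cases h2 : d > b <;> simp [h2] <;> omega
    | cons e t' =>
      have hdt : ∀ x ∈ (e :: t'), 0 ≤ x ∧ x ≤ 9 := fun x hx => hd x (by simp [hx])
      have hdd := hd d (by simp)
      have hml : 0 ≤ maxL (e :: t') := maxL_nonneg _
      have hml9 : maxL (e :: t') ≤ 9 := maxL_le _ (fun x hx => (hdt x hx).2)
      have hmc := maxL_cons d (e :: t')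
      by_cases h1 : d > a
      · simp only [g, P, if_pos h1]
        rw [ih d 0 (by omega) le_rfl (by omega) hdt]
        omega
      · by_cases h2 : d > b
        · simp only [g, P, if_neg h1, if_pos h2]
          rw [ih a d ha (by omega) (by omega) hdt]
          omega
        · simp only [g, P, if_neg h1, if_neg h2]
          rw [ih a b ha hb0 hb9 hdt]
          omega

-- the two per-line characterizations agree
theorem line_eq (l : List Int) (hd : ∀ d ∈ l, 0 ≤ d ∧ d ≤ 9) :
    max (maxL l) (P 0 l) = Mb l := by
  induction l with
  | nil => simp [P, Mb, maxL]
  | cons d t ih =>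
    cases t with
    | nil =>
      have hdd := hd d (by simp)
      simp [P, Mb, maxL]
      omega
    | cons e t' =>
      have hdt : ∀ x ∈ (e :: t'), 0 ≤ x ∧ x ≤ 9 := fun x hx => hd x (by simp [hx])
      have hdd := hd d (by simp)
      have hml : 0 ≤ maxL (e :: t') := maxL_nonneg _
      have hih := ih hdt
      have hbr := P_bridge (e :: t') 0 d (le_rfl) (by omega) hdt
      have han := P_anti (e :: t') 0 d (by omega)
      have hmc := maxL_cons d (e :: t')
      by_cases h1 : d > 0
      · simp only [P, if_pos h1, Mb]
        omega
      · simp only [P, if_neg h1, Mb]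
        omega

-- every line produced by split("\n") consists of digits when the input has only digits and newlines
theorem go_digits (fuel : Nat) : ∀ (l cur : List Char) (acc : List (List Char)),
    l.length < fuel →
    (∀ c ∈ l, PySem.Chars.isdigit c = true ∨ c = '\n') →
    (∀ c ∈ cur, PySem.Chars.isdigit c = true) →
    (∀ cs ∈ acc, ∀ c ∈ cs, PySem.Chars.isdigit c = true) →
    ∀ line ∈ PySem.Chars.splitOn.go ['\n'] fuel l cur acc, ∀ c ∈ line,
      PySem.Chars.isdigit c = true := by
  induction fuel with
  | zero => intro l cur acc hlen; omega
  | succ n ih =>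
    intro l cur acc hlen hl hcur hacc line hline c hc
    cases l with
    | nil =>
      simp only [PySem.Chars.splitOn.go, List.mem_reverse, List.mem_cons] at hline
      rcases hline with h | h
      · exact hcur c (by rw [h] at hc; exact List.mem_reverse.mp hc)
      · exact hacc line h c hc
    | cons ch rest =>
      by_cases hch : ch = '\n'
      · subst hch
        have hpre : List.isPrefixOf ['\n'] ('\n' :: rest) = true := by
          simp [List.isPrefixOf]
        simp only [PySem.Chars.splitOn.go, hpre, if_true] at hline
        refine ih (List.drop 1 ('\n' :: rest)) [] (cur.reverse :: acc) (by simp at hlen ⊢; omega)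
          (fun x hx => hl x (by simp at hx ⊢; exact Or.inr hx)) (by simp)
          ?_ line hline c hc
        intro cs hcs x hx
        rcases List.mem_cons.mp hcs with h | h
        · exact hcur x (by rw [h] at hx; exact List.mem_reverse.mp hx)
        · exact hacc cs h x hx
      · have hpre : List.isPrefixOf ['\n'] (ch :: rest) = false := by
          simp [List.isPrefixOf]
          intro h; exact absurd h.symm hch
        simp only [PySem.Chars.splitOn.go, hpre, Bool.false_eq_true, if_false] at hline
        refine ih rest (ch :: cur) acc (by simp at hlen ⊢; omega)
          (fun x hx => hl x (by simp [hx])) ?_ hacc line hline c hc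
        intro x hx
        rcases List.mem_cons.mp hx with h | h
        · subst h
          rcases hl x (by simp) with hd | hd
          · exact hd
          · exact absurd hd hch
        · exact hcur x h

theorem splitOn_digits (l : List Char)
    (h : ∀ c ∈ l, PySem.Chars.isdigit c = true ∨ c = '\n') :
    ∀ line ∈ PySem.Chars.splitOn l ['\n'], ∀ c ∈ line, PySem.Chars.isdigit c = true := by
  intro line hline
  exact go_digits (l.length + 1) l [] [] (by omega) h (by simp) (by simp) line hline

-- per line, A's loop and B's loop produce the same contribution
theorem per_line (line : List Char) (h : ∀ c ∈ line, PySem.Chars.isdigit c = true) :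
    (((PySem.List.enumerate line 0).foldl
      (fun (mx : Int × Int) ic =>
        let v := dval ic.2
        if v > mx.1 ∧ ic.1 < (line.length : Int) - 1 then (v, 0)
        else if v > mx.2 then (mx.1, v)
        else mx) (0, 0)).1 * 10
     + ((PySem.List.enumerate line 0).foldl
      (fun (mx : Int × Int) ic =>
        let v := dval ic.2
        if v > mx.1 ∧ ic.1 < (line.length : Int) - 1 then (v, 0)
        else if v > mx.2 then (mx.1, v)
        else mx) (0, 0)).2)
    = (line.reverse.foldl
      (fun (st : Int × Option Int) ch =>
        let d := dval ch
        match st.2 with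
        | none => (d, some d)
        | some m =>
          (if 10 * d + m > st.1 then 10 * d + m else st.1,
           some (if d > m then d else m))) (0, none)).1 := by
  have hd : ∀ d ∈ line.map dval, 0 ≤ d ∧ d ≤ 9 := by
    intro d hdm
    obtain ⟨c, hc, rfl⟩ := List.mem_map.mp hdm
    exact dval_digit c (h c hc)
  -- A side
  have hA := enumFold ((line.length : Int)) line 0 0 0 (by simp)
  rw [hA]
  have hg := g_spec (line.map dval) 0 0 le_rfl le_rfl (by omega) hd
  have hmx0 : max (0 : Int) (maxL (line.map dval)) = maxL (line.map dval) :=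
    max_eq_right (maxL_nonneg _)
  -- B side: push the fold through the map, then use bfold_spec
  have hBm : line.reverse.foldl
      (fun (st : Int × Option Int) ch =>
        let d := dval ch
        match st.2 with
        | none => (d, some d)
        | some m =>
          (if 10 * d + m > st.1 then 10 * d + m else st.1,
           some (if d > m then d else m))) (0, none)
      = (line.map dval).reverse.foldl
      (fun (st : Int × Option Int) d =>
        match st.2 with
        | none => (d, some d)
        | some m =>
          (if 10 * d + m > st.1 then 10 * d + m else st.1,
           some (if d > m then d else m))) (0, none) := by
    rw [← List.map_reverse, List.foldl_map]
  have hB := bfold_spec (line.map dval) (fun d hdm => (hd d hdm).1)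
  rw [hBm, hB]
  have hline := line_eq (line.map dval) hd
  omega

-- ===== VERDICT (by name: the statement is the Claim_ definition above) =====
theorem part1_spec : Claim_equal_part1 := by
  intro input _hdom hpre
  have hchars : ∀ c ∈ input.toList, PySem.Chars.isdigit c = true ∨ c = '\n' := by
    simp only [Pre_part1, List.all_eq_true, Bool.or_eq_true, beq_iff_eq] at hpre
    exact hpre
  simp only [Spec_part1, part1, part1_alt]
  apply PySem.List.foldl_congr_mem
  intro acc line hline
  have := per_line line (splitOn_digits input.toList hchars line hline)
  simp only [] at this ⊢
  omega
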